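-- pv_equiv track=rewrite | github.com/ACComputing/-nx2emubyacholdings | byacnx2emu0.4.1.py | _decode_bitmask_imm
-- ===== SOURCE A (Python) =====
-- def _decode_bitmask_imm(N: int, imms: int, immr: int, regsize: int) -> int:
--     """Implements DecodeBitMasks from ARM ARM - used for logical (imm)."""
--     length = (N << 6) | ((~imms) & 0x3F)
--     # find highest set bit
--     for i in range(6, -1, -1):
--         if (length >> i) & 1:
--             length = i
--             break
--     else:
--         return 0
--     if length < 0: return 0
--     size = 1 << length
--     if size > regsize: return 0
--     levels = size - 1
--     s = imms & levels
--     r = immr & levels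
--     if s == levels:
--         return 0  # reserved
--     # welem = ZeroExtend(Ones(s+1), size)
--     welem = (1 << (s + 1)) - 1
--     # ROR welem right by r, within 'size' bits
--     welem = ((welem >> r) | (welem << (size - r))) & ((1 << size) - 1)
--     # Replicate welem across regsize
--     out = 0
--     reps = regsize // size
--     for i in range(reps):
--         out |= welem << (i * size)
--     return out & ((1 << regsize) - 1)
-- ===== SOURCE B (Python) =====
-- def _decode_bitmask_imm(N: int, imms: int, immr: int, regsize: int) -> int:
--     """DecodeBitMasks, closed-form variant: bit_length instead of the bit-search
--     loop, and replicate-then-rotate (one repunit multiplication and a single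
--     full-width rotation) instead of rotate-then-replicate with an OR loop."""
--     length = (((N << 6) | (~imms & 0x3F)) & 0x7F).bit_length() - 1
--     if length < 0:
--         return 0
--     size = 1 << length
--     if size > regsize:
--         return 0
--     s = imms & (size - 1)
--     if s == size - 1:
--         return 0  # reserved
--     r = immr & (size - 1)
--     width = (regsize // size) * size
--     repunit = ((1 << width) - 1) // ((1 << size) - 1)
--     pattern = ((1 << (s + 1)) - 1) * repunit
--     return ((pattern >> r) | (pattern << (width - r))) & ((1 << width) - 1)
-- ===== Notes on version B (the rewrite author's own statement) =====
-- stated objective: alternative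
-- what changed: B finds the pattern length with bit_length instead of A's descending bit-search loop, and builds the result as replicate-then-rotate: one repunit multiplication replicates Ones(s+1) across the whole width and a single full-width rotation replaces A's per-element ROR followed by the OR-accumulation loop.
import Mathlib
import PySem

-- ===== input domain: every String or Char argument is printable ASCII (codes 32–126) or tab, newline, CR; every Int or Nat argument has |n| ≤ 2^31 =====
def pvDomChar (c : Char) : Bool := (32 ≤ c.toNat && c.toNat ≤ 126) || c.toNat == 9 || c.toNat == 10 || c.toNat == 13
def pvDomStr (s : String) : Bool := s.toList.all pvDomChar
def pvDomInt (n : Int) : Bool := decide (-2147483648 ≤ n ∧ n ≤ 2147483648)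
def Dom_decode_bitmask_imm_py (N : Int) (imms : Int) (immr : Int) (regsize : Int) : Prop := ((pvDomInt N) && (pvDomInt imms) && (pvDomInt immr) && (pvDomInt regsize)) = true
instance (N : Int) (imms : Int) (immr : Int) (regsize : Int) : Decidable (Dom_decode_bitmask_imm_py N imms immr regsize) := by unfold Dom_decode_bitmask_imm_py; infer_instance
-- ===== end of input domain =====

-- B finds the pattern length with bit_length instead of A's bit-search loop, and
-- replicates first (one repunit multiplication) then rotates once at full width,
-- instead of A's per-element ROR followed by an OR-accumulation loop (objective: alternative).

-- ===== PORT A =====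
-- A's 'for i in range(6,-1,-1): if (length >> i) & 1: … break / else: return 0' loop:
-- returns the first i in the list whose bit is set, none = the for-else branch.
def pvFindHi : List Int → Int → Option Int
  | [], _ => none
  | i :: rest, length =>
    if PySem.Int.band (length >>> i.toNat) 1 ≠ 0 then some i else pvFindHi rest length

def decode_bitmask_imm_py (N : Int) (imms : Int) (immr : Int) (regsize : Int) : Int :=
  let length := PySem.Int.bor (N <<< 6) (PySem.Int.band (Int.not imms) 63)
  match pvFindHi (PySem.List.pyRange 6 (-1) (-1)) length with
  | none => 0
  | some length =>
    if length < 0 then 0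
    else
      let size : Int := (1 : Int) <<< length.toNat
      if size > regsize then 0
      else
        let levels := size - 1
        let s := PySem.Int.band imms levels
        let r := PySem.Int.band immr levels
        if s = levels then 0
        else
          let welem0 := ((1 : Int) <<< (s + 1).toNat) - 1
          let welem := PySem.Int.band
            (PySem.Int.bor (welem0 >>> r.toNat) (welem0 <<< (size - r).toNat))
            (((1 : Int) <<< size.toNat) - 1)
          let reps := PySem.Int.floordiv regsize size
          let out := (PySem.List.pyRange 0 reps 1).foldl
            (fun out i => PySem.Int.bor out (welem <<< (i * size).toNat)) 0
          PySem.Int.band out (((1 : Int) <<< regsize.toNat) - 1)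

-- ===== PORT B =====
def decode_bitmask_imm_py_alt (N : Int) (imms : Int) (immr : Int) (regsize : Int) : Int :=
  let length : Int :=
    (PySem.Int.bitLength (PySem.Int.band (PySem.Int.bor (N <<< 6) (PySem.Int.band (Int.not imms) 63)) 127) : Int) - 1
  if length < 0 then 0
  else
    let size : Int := (1 : Int) <<< length.toNat
    if size > regsize then 0
    else
      let s := PySem.Int.band imms (size - 1)
      if s = size - 1 then 0
      else
        let r := PySem.Int.band immr (size - 1)
        let width := (PySem.Int.floordiv regsize size) * size
        let repunit := PySem.Int.floordiv (((1 : Int) <<< width.toNat) - 1) (((1 : Int) <<< size.toNat) - 1)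
        let pattern := (((1 : Int) <<< (s + 1).toNat) - 1) * repunit
        PySem.Int.band
          (PySem.Int.bor (pattern >>> r.toNat) (pattern <<< (width - r).toNat))
          (((1 : Int) <<< width.toNat) - 1)

-- ===== PRECONDITION & SPEC =====
def Spec_decode_bitmask_imm_py (N : Int) (imms : Int) (immr : Int) (regsize : Int) (out : Int) : Prop := out = decode_bitmask_imm_py_alt N imms immr regsize
instance (N : Int) (imms : Int) (immr : Int) (regsize : Int) (out : Int) : Decidable (Spec_decode_bitmask_imm_py N imms immr regsize out) := by unfold Spec_decode_bitmask_imm_py; infer_instance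

-- ===== CLAIM (what is proved, stated in full; the proofs are below) =====
def Claim_equal_decode_bitmask_imm_py : Prop := ∀ (N : Int) (imms : Int) (immr : Int) (regsize : Int), Dom_decode_bitmask_imm_py N imms immr regsize → Spec_decode_bitmask_imm_py N imms immr regsize (decode_bitmask_imm_py N imms immr regsize)

-- ===== LEMMAS AND PROOFS =====

-- x & 127 is x mod 128, also for negative x (Python two's-complement `&`).
theorem pv_band127 (raw : Int) : PySem.Int.band raw 127 = raw % 128 := by
  have h127 : ∀ n : Nat, n &&& 127 = n % 128 := fun n => Nat.and_two_pow_sub_one_eq_mod n 7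
  unfold PySem.Int.band
  by_cases h : 0 ≤ raw
  · simp only [h, show (0:Int) ≤ 127 by norm_num, if_pos]
    rw [show (127:Int).toNat = 127 from rfl, h127]
    omega
  · simp only [h, if_false, show (0:Int) ≤ 127 by norm_num, if_pos]
    rw [show (127:Int).toNat = 127 from rfl, Nat.and_comm, h127]
    omega

-- x & (2^k - 1) is x mod 2^k, also for negative x.
theorem pv_band_mask (x : Int) (k : Nat) :
    PySem.Int.band x ((2:Int) ^ k - 1) = x % (2:Int) ^ k := by
  have hp : (0:Int) < 2 ^ k := by positivity
  have hc : (((2:Nat) ^ k : Nat) : Int) = (2:Int) ^ k := by push_cast; ring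
  have htn : ((2:Int) ^ k - 1).toNat = 2 ^ k - 1 := by omega
  have hmod : ∀ n : Nat, n &&& (2 ^ k - 1) = n % 2 ^ k :=
    fun n => Nat.and_two_pow_sub_one_eq_mod n k
  unfold PySem.Int.band
  by_cases h : 0 ≤ x
  · simp only [h, show (0:Int) ≤ 2 ^ k - 1 by omega, if_pos]
    rw [htn, hmod]
    conv_rhs => rw [show x = ((x.toNat : Nat) : Int) by omega, ← hc]
    exact_mod_cast (Int.natCast_emod x.toNat (2 ^ k)).symm
  · simp only [h, if_false, show (0:Int) ≤ 2 ^ k - 1 by omega, if_pos]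
    rw [htn, Nat.and_comm, hmod]
    set n : Nat := (-x - 1).toNat with hn
    have hx : x = -(n : Int) - 1 := by omega
    have hcm : ((n % 2 ^ k : Nat) : Int) = (n : Int) % (2:Int) ^ k := by
      rw [← hc]; exact_mod_cast Int.natCast_emod n (2 ^ k)
    have hb1 : 0 ≤ (n : Int) % (2:Int) ^ k := Int.emod_nonneg _ (by omega)
    have hb2 : (n : Int) % (2:Int) ^ k < 2 ^ k := Int.emod_lt_of_pos _ hp
    have key : (-(n:Int) - 1) % (2:Int) ^ k = 2 ^ k - 1 - (n : Int) % (2:Int) ^ k := by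
      have hd := Int.emod_add_ediv (n : Int) ((2:Int) ^ k)
      have hrw : (-(n:Int) - 1)
          = ((2:Int) ^ k - 1 - (n : Int) % (2:Int) ^ k) + (2:Int) ^ k * (-( (n:Int) / (2:Int) ^ k) - 1) := by
        ring_nf
        ring_nf at hd
        omega
      rw [hrw, Int.add_mul_emod_self_left, Int.emod_eq_of_lt (by omega) (by omega)]
    rw [hx, key]
    have hle : n % 2 ^ k ≤ 2 ^ k - 1 := by
      have := Nat.mod_lt n (show 0 < 2 ^ k by positivity); omega
    push_cast [Nat.cast_sub hle] at *
    omega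

-- bit i of x (i ≤ 6) only depends on x mod 128.
theorem pv_test_eq (raw : Int) (i : Nat) (hi : i ≤ 6) :
    PySem.Int.band (raw >>> i) 1 = PySem.Int.band ((raw % 128) >>> i) 1 := by
  rw [PySem.Int.band_one, PySem.Int.band_one,
    PySem.Int.mod_eq_emod_of_pos (by norm_num), PySem.Int.mod_eq_emod_of_pos (by norm_num),
    Int.shiftRight_eq_div_pow, Int.shiftRight_eq_div_pow]
  interval_cases i <;> norm_num <;> omega

theorem pv_find_small : ∀ k : Nat, k < 128 →
    pvFindHi [6, 5, 4, 3, 2, 1, 0] (k : Int) =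
      (if (k : Int) = 0 then none else some ((PySem.Int.bitLength (k : Int) : Int) - 1)) := by
  decide

theorem pvFindHi_char (raw : Int) :
    pvFindHi (PySem.List.pyRange 6 (-1) (-1)) raw =
      (if PySem.Int.band raw 127 = 0 then none
       else some ((PySem.Int.bitLength (PySem.Int.band raw 127) : Int) - 1)) := by
  have hr : PySem.List.pyRange 6 (-1) (-1) = [6, 5, 4, 3, 2, 1, 0] := by decide
  rw [hr, pv_band127]
  have step : pvFindHi [6, 5, 4, 3, 2, 1, 0] raw = pvFindHi [6, 5, 4, 3, 2, 1, 0] (raw % 128) := by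
    simp only [pvFindHi]
    rw [show ((6:Int).toNat) = 6 from rfl, show ((5:Int).toNat) = 5 from rfl,
        show ((4:Int).toNat) = 4 from rfl, show ((3:Int).toNat) = 3 from rfl,
        show ((2:Int).toNat) = 2 from rfl, show ((1:Int).toNat) = 1 from rfl,
        show ((0:Int).toNat) = 0 from rfl]
    rw [pv_test_eq raw 6 (by norm_num), pv_test_eq raw 5 (by norm_num),
        pv_test_eq raw 4 (by norm_num), pv_test_eq raw 3 (by norm_num),
        pv_test_eq raw 2 (by norm_num), pv_test_eq raw 1 (by norm_num),
        pv_test_eq raw 0 (by norm_num)]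
  rw [step, show raw % 128 = (((raw % 128).toNat : Nat) : Int) by omega]
  exact pv_find_small (raw % 128).toNat (by omega)

-- the repunit 1 + p + p^2 + … + p^(n-1)
def pvGeom (p : Nat) : Nat → Nat
  | 0 => 0
  | n + 1 => pvGeom p n + p ^ n

theorem pvGeom_mul_lt (p w : Nat) (hw : w < p) : ∀ n, w * pvGeom p n < p ^ n := by
  intro n
  induction n with
  | zero => simp [pvGeom]
  | succ n ih =>
    have h1 : w * p ^ n ≤ (p - 1) * p ^ n := Nat.mul_le_mul_right _ (by omega)
    have h2 : p ^ (n + 1) = p * p ^ n := by ring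
    have h3 : 1 ≤ p := by omega
    calc w * pvGeom p (n + 1) = w * pvGeom p n + w * p ^ n := by simp [pvGeom]; ring
      _ < p ^ n + (p - 1) * p ^ n := by omega
      _ ≤ p ^ (n + 1) := by rw [h2]; have := Nat.one_le_pow n p (by omega); nlinarith [Nat.sub_add_cancel h3]

theorem pvGeom_mul (p : Nat) (hp : 1 ≤ p) : ∀ n, pvGeom p n * (p - 1) = p ^ n - 1 := by
  intro n
  induction n with
  | zero => simp [pvGeom]
  | succ n ih =>
    have h1 : 1 ≤ p ^ n := Nat.one_le_pow n p (by omega)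
    have h2 : p ^ (n + 1) = p * p ^ n := by ring
    simp only [pvGeom]
    zify [hp, h1, show 1 ≤ p ^ (n+1) from Nat.one_le_pow _ p (by omega)] at *
    linear_combination ih + (h2 : ((p:Int) ^ (n+1) = p * p ^ n))

-- for reps ≥ 1 the repunit is 1 plus a multiple of p
theorem pvGeom_one_add (p : Nat) : ∀ n, 1 ≤ n → ∃ H, pvGeom p n = 1 + p * H := by
  intro n
  induction n with
  | zero => omega
  | succ n ih =>
    intro _
    by_cases hn : 1 ≤ n
    · obtain ⟨H, hH⟩ := ih hn
      exact ⟨H + p ^ (n - 1), by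
        simp only [pvGeom, hH]
        have : p ^ n = p * p ^ (n - 1) := by
          conv_lhs => rw [show n = 1 + (n - 1) by omega]
          ring
        rw [this]; ring⟩
    · have : n = 0 := by omega
      subst this
      exact ⟨0, by simp [pvGeom]⟩

-- the Python floordiv ((1<<(n*size))-1)//((1<<size)-1) IS the repunit pvGeom
theorem pv_repunit (size : Int) (hsz : 0 < size) (n : Nat) :
    PySem.Int.floordiv (((1 : Int) <<< ((n : Int) * size).toNat) - 1) (((1 : Int) <<< size.toNat) - 1)
      = ((pvGeom (2 ^ size.toNat) n : Nat) : Int) := by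
  set sz : Nat := size.toNat with hszdef
  have hsz1 : 1 ≤ sz := by omega
  set p : Nat := 2 ^ sz with hpdef
  have hp2 : 2 ≤ p := by
    calc 2 = 2 ^ 1 := rfl
    _ ≤ 2 ^ sz := Nat.pow_le_pow_right (by norm_num) hsz1
  have hshl : ∀ k : Nat, (1 : Int) <<< k = ((2 ^ k : Nat) : Int) := by
    intro k; rw [Int.shiftLeft_eq]; push_cast; ring
  have hmul : ((n : Int) * size).toNat = n * sz := by
    rw [show (n : Int) * size = ((n * sz : Nat) : Int) by
      rw [show size = (sz : Int) by omega]; push_cast; ring]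
    exact Int.toNat_natCast _
  rw [hmul, hshl, hshl]
  have h1 : 1 ≤ p ^ n := Nat.one_le_pow n p (by omega)
  have hnum : ((2 ^ (n * sz) : Nat) : Int) - 1 = (((pvGeom p n) * (p - 1) : Nat) : Int) := by
    rw [pvGeom_mul p (by omega) n]
    have : (2 : Nat) ^ (n * sz) = p ^ n := by rw [hpdef, ← pow_mul, mul_comm]
    rw [this]
    omega
  have hden : ((2 ^ sz : Nat) : Int) - 1 = ((p - 1 : Nat) : Int) := by omega
  rw [hnum, hden, PySem.Int.floordiv_eq_ediv_of_pos (by omega)]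
  push_cast
  exact Int.mul_ediv_cancel _ (by omega)

-- A's OR-accumulation loop is multiplication by the repunit
theorem pv_rep_fold (w size : Int) (hsz : 0 < size) (hw0 : 0 ≤ w) (hw : w < (1 : Int) <<< size.toNat) :
    ∀ n : Nat,
      (PySem.List.pyRange 0 (n : Int) 1).foldl
          (fun out i => PySem.Int.bor out (w <<< (i * size).toNat)) 0
        = w * ((pvGeom (2 ^ size.toNat) n : Nat) : Int) := by
  intro n
  set sz : Nat := size.toNat with hszdef
  set p : Nat := 2 ^ sz with hpdef
  have hshl : ∀ k : Nat, (1 : Int) <<< k = ((2 ^ k : Nat) : Int) := by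
    intro k; rw [Int.shiftLeft_eq]; push_cast; ring
  have hwp : w.toNat < p := by
    have := hw; rw [hshl] at this; omega
  have hmul : ∀ m : Nat, ((m : Int) * size).toNat = m * sz := by
    intro m
    rw [show (m : Int) * size = ((m * sz : Nat) : Int) by
      rw [show size = (sz : Int) by omega]; push_cast; ring]
    exact Int.toNat_natCast _
  induction n with
  | zero =>
    rw [show ((0 : Nat) : Int) = 0 by norm_num, PySem.List.pyRange_one_eq_nil (le_refl 0)]
    simp [pvGeom]
  | succ n ih =>
    rw [show ((n + 1 : Nat) : Int) = (n : Int) + 1 by push_cast; ring,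
      PySem.List.pyRange_one_succ_right (by positivity), List.foldl_append]
    simp only [List.foldl_cons, List.foldl_nil]
    rw [ih]
    have hshl2 : w <<< ((n : Int) * size).toNat = ((w.toNat <<< (n * sz) : Nat) : Int) := by
      rw [hmul, Int.shiftLeft_eq, Nat.shiftLeft_eq]
      push_cast [Int.toNat_of_nonneg hw0]
      ring
    rw [show w * ((pvGeom p n : Nat) : Int) = ((w.toNat * pvGeom p n : Nat) : Int) by
        push_cast [Int.toNat_of_nonneg hw0]; ring,
      hshl2, PySem.Int.bor_natCast]
    rw [Nat.lor_comm, ← Nat.shiftLeft_add_eq_or_of_lt]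
    · have hpow : (2:Nat) ^ (n * sz) = p ^ n := by rw [hpdef, ← pow_mul, mul_comm]
      rw [show w.toNat <<< (n * sz) + w.toNat * pvGeom p n
          = w.toNat * pvGeom p (n + 1) by
        rw [Nat.shiftLeft_eq, hpow]; simp [pvGeom]; ring]
      push_cast [Int.toNat_of_nonneg hw0]
      ring
    · have hpow : (2:Nat) ^ (n * sz) = p ^ n := by rw [hpdef, ← pow_mul, mul_comm]
      rw [hpow]
      exact pvGeom_mul_lt p w.toNat hwp n

-- a rotate-right by r within W bits, written as OR of shifts then masked, is
-- (x mod 2^r) · 2^(W-r) + x / 2^r   (for x < 2^W, r ≤ W)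
theorem pv_rot_add (x r W : Nat) (hx : x < 2 ^ W) (hr : r ≤ W) :
    ((x >>> r) ||| (x <<< (W - r))) &&& (2 ^ W - 1) = x % 2 ^ r * 2 ^ (W - r) + x / 2 ^ r := by
  have hpw : 2 ^ r * 2 ^ (W - r) = 2 ^ W := by rw [← pow_add]; congr 1; omega
  have hdiv : x / 2 ^ r < 2 ^ (W - r) := Nat.div_lt_of_lt_mul (by rw [hpw]; exact hx)
  rw [Nat.shiftRight_eq_div_pow, Nat.lor_comm, ← Nat.shiftLeft_add_eq_or_of_lt hdiv,
    Nat.and_two_pow_sub_one_eq_mod, Nat.shiftLeft_eq]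
  have hxeq : x * 2 ^ (W - r) + x / 2 ^ r
      = 2 ^ W * (x / 2 ^ r) + (x % 2 ^ r * 2 ^ (W - r) + x / 2 ^ r) := by
    nth_rewrite 1 [← Nat.div_add_mod x (2 ^ r)]
    rw [← hpw]; ring
  rw [hxeq, Nat.mul_add_mod]
  apply Nat.mod_eq_of_lt
  have h1 : x % 2 ^ r ≤ 2 ^ r - 1 := by
    have := Nat.mod_lt x (show 0 < 2 ^ r by positivity); omega
  calc x % 2 ^ r * 2 ^ (W - r) + x / 2 ^ r
      < x % 2 ^ r * 2 ^ (W - r) + 2 ^ (W - r) := by omega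
    _ ≤ (2 ^ r - 1) * 2 ^ (W - r) + 2 ^ (W - r) := by
        have := Nat.mul_le_mul_right (2 ^ (W - r)) h1; omega
    _ = 2 ^ r * 2 ^ (W - r) := by
        rw [Nat.sub_mul, one_mul]
        have : 2 ^ (W - r) ≤ 2 ^ r * 2 ^ (W - r) :=
          Nat.le_mul_of_pos_left _ (by positivity)
        omega
    _ = 2 ^ W := hpw

-- KEY: rotating each size-bit element then replicating = replicating then one full-width rotate
theorem pv_ror_rep (sz r reps w : Nat) (hr : r < sz) (hw : w < 2 ^ sz) (hreps : 1 ≤ reps) :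
    (((w >>> r) ||| (w <<< (sz - r))) &&& (2 ^ sz - 1)) * pvGeom (2 ^ sz) reps
      = (((w * pvGeom (2 ^ sz) reps) >>> r) ||| ((w * pvGeom (2 ^ sz) reps) <<< (reps * sz - r)))
          &&& (2 ^ (reps * sz) - 1) := by
  set G : Nat := pvGeom (2 ^ sz) reps with hG
  have hW : (2 ^ sz : Nat) ^ reps = 2 ^ (reps * sz) := by rw [← pow_mul, mul_comm]
  have hwG : w * G < 2 ^ (reps * sz) := by
    rw [← hW]; exact pvGeom_mul_lt (2 ^ sz) w hw reps
  have hrW : r ≤ reps * sz := le_trans hr.le (Nat.le_mul_of_pos_left sz hreps)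
  -- replace w's rotate by pv_rot_add over sz bits: the masked OR IS the rotate sum
  have hrot1 : ((w >>> r) ||| (w <<< (sz - r))) &&& (2 ^ sz - 1)
      = w % 2 ^ r * 2 ^ (sz - r) + w / 2 ^ r := pv_rot_add w r sz hw hr.le
  have hrot2 : (((w * G) >>> r) ||| ((w * G) <<< (reps * sz - r))) &&& (2 ^ (reps * sz) - 1)
      = (w * G) % 2 ^ r * 2 ^ (reps * sz - r) + (w * G) / 2 ^ r :=
    pv_rot_add (w * G) r (reps * sz) hwG hrW
  rw [hrot1, hrot2]
  -- (w*G) mod 2^r = w mod 2^r  (G = 1 + 2^sz·H and r < sz)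
  obtain ⟨H, hH⟩ := pvGeom_one_add (2 ^ sz) reps hreps
  have hmod : (w * G) % 2 ^ r = w % 2 ^ r := by
    have hsplit : w * G = w + 2 ^ r * (2 ^ (sz - r) * w * H) := by
      rw [← hG] at hH
      rw [hH, Nat.mul_add, Nat.mul_one]
      congr 1
      rw [show (2:Nat) ^ sz = 2 ^ r * 2 ^ (sz - r) by rw [← pow_add]; congr 1; omega]
      ring
    rw [hsplit, Nat.add_mul_mod_self_left]
  have hkey : G * (2 ^ sz - 1) = 2 ^ (reps * sz) - 1 := by
    rw [hG, pvGeom_mul (2 ^ sz) (Nat.one_le_pow _ _ (by norm_num)) reps, hW]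
  apply Nat.eq_of_mul_eq_mul_left (show 0 < 2 ^ r by positivity)
  have hd1 := Nat.div_add_mod w (2 ^ r)
  have hd2 := Nat.div_add_mod (w * G) (2 ^ r)
  have hpw1 : (2:Nat) ^ r * 2 ^ (sz - r) = 2 ^ sz := by rw [← pow_add]; congr 1; omega
  have hpw2 : (2:Nat) ^ r * 2 ^ (reps * sz - r) = 2 ^ (reps * sz) := by
    rw [← pow_add]; congr 1; omega
  have hz1 : 1 ≤ (2:Nat) ^ sz := Nat.one_le_pow _ _ (by norm_num)
  have hz2 : 1 ≤ (2:Nat) ^ (reps * sz) := Nat.one_le_pow _ _ (by norm_num)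
  zify [hz1, hz2] at hkey
  zify
  zify at hd1 hd2 hmod hpw1 hpw2
  linear_combination ((w : Int) % 2 ^ r) * hkey + ((w : Int) % 2 ^ r) * (G : Int) * hpw1
    - ((w : Int) % 2 ^ r) * hpw2 + (G : Int) * hd1 - hd2
    + ((1:Int) - 2 ^ r * 2 ^ (reps * sz - r)) * hmod

-- ===== VERDICT (by name: the statement is the Claim_ definition above) =====
theorem decode_bitmask_imm_py_spec : Claim_equal_decode_bitmask_imm_py := by
  intro N imms immr regsize _
  unfold Spec_decode_bitmask_imm_py decode_bitmask_imm_py decode_bitmask_imm_py_alt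
  dsimp only []
  rw [pvFindHi_char]
  set raw := PySem.Int.bor (N <<< 6) (PySem.Int.band (Int.not imms) 63) with hraw
  by_cases hm : PySem.Int.band raw 127 = 0
  · rw [if_pos hm, hm]
    norm_num [PySem.Int.bitLength]
  · rw [if_neg hm]
    have hbl : 1 ≤ PySem.Int.bitLength (PySem.Int.band raw 127) := by
      by_contra h
      have h0 : PySem.Int.bitLength (PySem.Int.band raw 127) = 0 := by omega
      have h1 := PySem.Int.lt_two_pow_bitLength (PySem.Int.band raw 127)
      rw [h0] at h1
      exact hm (by omega)
    set L : Int := (PySem.Int.bitLength (PySem.Int.band raw 127) : Int) - 1 with hL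
    have hLnn : ¬ L < 0 := by omega
    simp only []
    rw [if_neg hLnn, if_neg hLnn]
    set size : Int := (1 : Int) <<< L.toNat with hsize
    have hszpos : (0:Int) < size := by
      rw [hsize, Int.shiftLeft_eq]; positivity
    by_cases hgt : size > regsize
    · rw [if_pos hgt, if_pos hgt]
    · rw [if_neg hgt, if_neg hgt]
      have hL0 : (0:Int) ≤ L := by omega
      have hshlK : ∀ k : Nat, (1 : Int) <<< k = ((2 ^ k : Nat) : Int) := by
        intro k; rw [Int.shiftLeft_eq]; push_cast; ring
      have hsizepow : size = (2:Int) ^ L.toNat := by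
        rw [hsize, Int.shiftLeft_eq, one_mul]
      set s : Int := PySem.Int.band imms (size - 1) with hs
      set r : Int := PySem.Int.band immr (size - 1) with hr
      have hpowpos : (0:Int) < 2 ^ L.toNat := by positivity
      have hsmod : s = imms % (2:Int) ^ L.toNat := by
        rw [hs, show size - 1 = (2:Int) ^ L.toNat - 1 by omega]
        exact pv_band_mask imms L.toNat
      have hrmod : r = immr % (2:Int) ^ L.toNat := by
        rw [hr, show size - 1 = (2:Int) ^ L.toNat - 1 by omega]
        exact pv_band_mask immr L.toNat
      have hsb : 0 ≤ s ∧ s < size := by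
        rw [hsmod, hsizepow]
        exact ⟨Int.emod_nonneg _ (by omega), Int.emod_lt_of_pos _ hpowpos⟩
      have hrb : 0 ≤ r ∧ r < size := by
        rw [hrmod, hsizepow]
        exact ⟨Int.emod_nonneg _ (by omega), Int.emod_lt_of_pos _ hpowpos⟩
      by_cases hres : s = size - 1
      · rw [if_pos hres, if_pos hres]
      · rw [if_neg hres, if_neg hres]
        have hslt : s < size - 1 := by omega
        have hsize2 : (2:Int) ≤ size := by omega
        -- Nat atoms
        set SZ : Nat := size.toNat with hSZ
        have hSZ1 : 1 ≤ SZ := by omega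
        set rN : Nat := r.toNat with hrNdef
        have hrN : rN < SZ := by omega
        set sN : Nat := (s + 1).toNat with hsNdef
        have hsN : sN ≤ SZ - 1 := by omega
        have hc2 : ∀ k : Nat, (((2:Nat) ^ k : Nat) : Int) = (2:Int) ^ k := by
          intro k; push_cast; ring
        set wN : Nat := 2 ^ sN - 1 with hwNdef
        have h1le : ∀ k : Nat, 1 ≤ (2:Nat) ^ k := fun k => Nat.one_le_pow _ _ (by norm_num)
        have hw0 : ((1:Int) <<< sN) - 1 = ((wN : Nat) : Int) := by
          rw [hshlK]
          have := h1le sN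
          omega
        have hwlt : wN < 2 ^ SZ := by
          have h := Nat.pow_le_pow_right (show 1 ≤ 2 by norm_num) (show sN ≤ SZ by omega)
          have := h1le sN
          omega
        have hshr : ∀ (m k : Nat), ((m : Nat) : Int) >>> k = ((m >>> k : Nat) : Int) := by
          intro m k
          rw [Int.shiftRight_eq_div_pow, Nat.shiftRight_eq_div_pow, Int.natCast_ediv]
        have hshlN : ∀ (m k : Nat), ((m : Nat) : Int) <<< k = ((m <<< k : Nat) : Int) := by
          intro m k; rw [Int.shiftLeft_eq, Nat.shiftLeft_eq]; push_cast; ring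
        set reps : Int := PySem.Int.floordiv regsize size with hreps
        have hrepspos : 1 ≤ reps := by
          rw [hreps, PySem.Int.floordiv_eq_ediv_of_pos hszpos]
          exact (Int.le_ediv_iff_mul_le hszpos).mpr (by omega)
        set repsN : Nat := reps.toNat with hrepsNdef
        have hrepsN1 : 1 ≤ repsN := by omega
        have hrepscast : reps = ((repsN : Nat) : Int) := by omega
        have hszcast : size = ((SZ : Nat) : Int) := by omega
        have hWcast : (reps * size).toNat = repsN * SZ := by
          rw [hrepscast, hszcast, ← Nat.cast_mul, Int.toNat_natCast]
        have hwle : reps * size ≤ regsize := by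
          have h := Int.ediv_add_emod regsize size
          have h2 := Int.emod_nonneg regsize (by omega : size ≠ 0)
          have h3 : reps * size = size * (regsize / size) := by
            rw [hreps, PySem.Int.floordiv_eq_ediv_of_pos hszpos]; ring
          omega
        have hszlew : size ≤ reps * size := le_mul_of_one_le_left hszpos.le hrepspos
        set G : Nat := pvGeom (2 ^ SZ) repsN with hGdef
        -- the masks, as casts
        have hmaskSZ : ((1:Int) <<< SZ) - 1 = (((2:Nat) ^ SZ - 1 : Nat) : Int) := by
          rw [hshlK]
          have := h1le SZ
          omega
        -- A's welem as a Nat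
        have hXcast : PySem.Int.bor ((((1:Int) <<< sN) - 1) >>> rN)
            ((((1:Int) <<< sN) - 1) <<< (size - r).toNat)
            = (((wN >>> rN ||| wN <<< (SZ - rN)) : Nat) : Int) := by
          rw [hw0, hshr, show (size - r).toNat = SZ - rN by omega, hshlN,
            PySem.Int.bor_natCast]
        have hwelem : PySem.Int.band
            (PySem.Int.bor ((((1:Int) <<< sN) - 1) >>> rN)
              ((((1:Int) <<< sN) - 1) <<< (size - r).toNat))
            (((1:Int) <<< SZ) - 1)
            = ((((wN >>> rN ||| wN <<< (SZ - rN)) &&& (2 ^ SZ - 1)) : Nat) : Int) := by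
          rw [hXcast, hmaskSZ, PySem.Int.band_natCast]
        set welemN : Nat := (wN >>> rN ||| wN <<< (SZ - rN)) &&& (2 ^ SZ - 1) with hwelemN
        have hwelemNlt : welemN < 2 ^ SZ := by
          rw [hwelemN, Nat.and_two_pow_sub_one_eq_mod]
          exact Nat.mod_lt _ (by positivity)
        rw [hwelem, hrepscast]
        rw [pv_rep_fold ((welemN : Nat) : Int) size hszpos (by positivity)
          (by rw [hshlK]; exact_mod_cast hwelemNlt) repsN]
        rw [pv_repunit size hszpos repsN]
        -- both sides to Nat
        have hG : welemN * G < 2 ^ (repsN * SZ) := by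
          have := pvGeom_mul_lt (2 ^ SZ) welemN hwelemNlt repsN
          rw [← pow_mul, mul_comm SZ repsN] at this
          exact this
        have hWR : repsN * SZ ≤ regsize.toNat := by
          have := hwle
          rw [hrepscast] at this
          omega
        -- A side: the outer band is the identity
        have hAside : PySem.Int.band (((welemN : Nat) : Int) * ((G : Nat) : Int))
            (((1:Int) <<< regsize.toNat) - 1) = (((welemN * G : Nat)) : Int) := by
          rw [show ((welemN : Nat) : Int) * ((G : Nat) : Int) = (((welemN * G : Nat)) : Int) by push_cast; ring]
          rw [show ((1:Int) <<< regsize.toNat) - 1 = (2:Int) ^ regsize.toNat - 1 by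
            rw [Int.shiftLeft_eq, one_mul]]
          rw [pv_band_mask]
          rw [← hc2 regsize.toNat, ← Int.natCast_emod]
          congr 1
          apply Nat.mod_eq_of_lt
          calc welemN * G < 2 ^ (repsN * SZ) := hG
            _ ≤ 2 ^ regsize.toNat := Nat.pow_le_pow_right (by norm_num) hWR
        rw [hAside]
        -- B side
        set PN : Nat := wN * G with hPN
        have hpat : ((1:Int) <<< sN - 1) * ((G : Nat) : Int) = ((PN : Nat) : Int) := by
          rw [hw0, hPN]; push_cast; ring
        rw [hpat]
        rw [hshr PN rN, show ((repsN : Nat) : Int) * size - r = (((repsN : Nat) : Int) * size - r) from rfl]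
        have hsub : (((repsN : Nat) : Int) * size - r).toNat = repsN * SZ - rN := by
          rw [← hrepscast]
          omega
        rw [hsub, hshlN PN (repsN * SZ - rN), PySem.Int.bor_natCast]
        have hmaskW : ((1:Int) <<< (((repsN : Nat) : Int) * size).toNat) - 1
            = (((2:Nat) ^ (repsN * SZ) - 1 : Nat) : Int) := by
          rw [← hrepscast, hWcast, hshlK]
          have := h1le (repsN * SZ)
          omega
        rw [show (((repsN : Nat) : Int) * size).toNat = repsN * SZ by rw [← hrepscast]; exact hWcast] at *
        rw [hmaskW, PySem.Int.band_natCast]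
        exact_mod_cast pv_ror_rep SZ rN repsN wN hrN hwlt hrepsN1
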